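-- pv_equiv track=rewrite | github.com/yelingshen/AIjq | archive/removed_scripts/20250927T061235Z/ai/server.py | generate_global_suggestions
-- ===== SOURCE A (Python) =====
-- def generate_global_suggestions(supported_files):
--     suggestions = []
--     py_files = [f for f in supported_files if f.endswith('.py')]
--     js_files = [f for f in supported_files if f.endswith('.js')]
--     config_files = [f for f in supported_files if f.endswith('.yaml') or f.endswith('.yml') or f.endswith('.json')]
--     doc_files = [f for f in supported_files if f.endswith('.md')]
--     # 联动性建议
--     if len(py_files) > 0 and len(js_files) > 0:
--         suggestions.append("建议：项目包含多语言脚本，建议实现 Python 与 JS 的数据或接口联动。")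
--     # 兼容性建议
--     if not config_files:
--         suggestions.append("建议：未检测到配置文件，建议添加 .yaml/.json 配置以提升环境兼容性。")
--     # 容错率建议
--     if any('test' in f.lower() for f in py_files):
--         suggestions.append("建议：已检测到测试脚本，建议完善异常处理和单元测试以提升容错率。")
--     else:
--         suggestions.append("建议：未检测到测试脚本，建议补充测试用例以提升项目健壮性。")
--     # 安全性建议
--     if any('security' in f.lower() for f in py_files):
--         suggestions.append("建议：已集成安全相关模块，建议定期进行安全扫描和依赖升级。")
--     else:
--         suggestions.append("建议：未检测到安全相关模块，建议增加安全扫描器或依赖检查功能。")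
--     # 多项化发展建议
--     if len(doc_files) > 0:
--         suggestions.append("建议：已检测到文档文件，可自动生成 API 文档和用户手册，支持多端协作。")
--     else:
--         suggestions.append("建议：未检测到文档文件，建议补充 README.md 或开发文档以提升项目多项化发展。")
--     suggestions.append("建议：可集成更多 AI 模型或插件，提升智能化和自动化能力。")
--     return suggestions
-- ===== SOURCE B (Python) =====
-- def generate_global_suggestions(supported_files):
--     # One pass over supported_files maintaining presence flags, instead of
--     # four list comprehensions plus two any() scans.
--     has_py = has_js = has_config = has_test = has_sec = has_doc = False
--     for f in supported_files:
--         if f.endswith('.py'):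
--             has_py = True
--             g = f.lower()
--             if 'test' in g:
--                 has_test = True
--             if 'security' in g:
--                 has_sec = True
--         if f.endswith('.js'):
--             has_js = True
--         if f.endswith('.yaml') or f.endswith('.yml') or f.endswith('.json'):
--             has_config = True
--         if f.endswith('.md'):
--             has_doc = True
--     suggestions = []
--     if has_py and has_js:
--         suggestions.append("建议：项目包含多语言脚本，建议实现 Python 与 JS 的数据或接口联动。")
--     if not has_config:
--         suggestions.append("建议：未检测到配置文件，建议添加 .yaml/.json 配置以提升环境兼容性。")
--     if has_test:
--         suggestions.append("建议：已检测到测试脚本，建议完善异常处理和单元测试以提升容错率。")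
--     else:
--         suggestions.append("建议：未检测到测试脚本，建议补充测试用例以提升项目健壮性。")
--     if has_sec:
--         suggestions.append("建议：已集成安全相关模块，建议定期进行安全扫描和依赖升级。")
--     else:
--         suggestions.append("建议：未检测到安全相关模块，建议增加安全扫描器或依赖检查功能。")
--     if has_doc:
--         suggestions.append("建议：已检测到文档文件，可自动生成 API 文档和用户手册，支持多端协作。")
--     else:
--         suggestions.append("建议：未检测到文档文件，建议补充 README.md 或开发文档以提升项目多项化发展。")
--     suggestions.append("建议：可集成更多 AI 模型或插件，提升智能化和自动化能力。")
--     return suggestions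
-- ===== Notes on version B (the rewrite author's own statement) =====
-- stated objective: simpler
-- what changed: Replaces the four list comprehensions and two any() scans (six traversals building intermediate lists) with one pass over supported_files that maintains six boolean presence flags, then emits the same suggestions in the same order from the flags.
import Mathlib
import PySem

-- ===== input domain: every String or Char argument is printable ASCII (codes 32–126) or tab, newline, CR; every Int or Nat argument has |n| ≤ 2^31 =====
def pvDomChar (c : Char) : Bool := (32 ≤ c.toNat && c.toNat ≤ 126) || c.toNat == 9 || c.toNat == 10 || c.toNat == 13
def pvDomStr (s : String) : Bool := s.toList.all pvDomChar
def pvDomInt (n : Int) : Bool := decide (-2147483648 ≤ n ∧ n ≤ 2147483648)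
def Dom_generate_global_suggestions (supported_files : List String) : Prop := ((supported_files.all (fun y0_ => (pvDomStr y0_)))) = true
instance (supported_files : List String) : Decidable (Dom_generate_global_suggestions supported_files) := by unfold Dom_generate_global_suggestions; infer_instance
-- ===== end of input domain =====

-- B replaces A's four list comprehensions and two any() scans with a single pass
-- maintaining six boolean presence flags (objective: simpler, same order of output).

-- ===== PORT A =====
def generate_global_suggestions (supported_files : List String) : List String :=
  let suggestions : List String := []
  let py_files := supported_files.filter (fun f => PySem.Str.endswith f ".py")
  let js_files := supported_files.filter (fun f => PySem.Str.endswith f ".js")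
  let config_files := supported_files.filter
    (fun f => PySem.Str.endswith f ".yaml" || PySem.Str.endswith f ".yml" || PySem.Str.endswith f ".json")
  let doc_files := supported_files.filter (fun f => PySem.Str.endswith f ".md")
  let suggestions := if (decide (0 < py_files.length) && decide (0 < js_files.length)) then
      suggestions ++ ["建议：项目包含多语言脚本，建议实现 Python 与 JS 的数据或接口联动。"] else suggestions
  let suggestions := if config_files.isEmpty then
      suggestions ++ ["建议：未检测到配置文件，建议添加 .yaml/.json 配置以提升环境兼容性。"] else suggestions
  let suggestions := if py_files.any (fun f => PySem.Str.isIn "test" (PySem.Str.lower f)) then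
      suggestions ++ ["建议：已检测到测试脚本，建议完善异常处理和单元测试以提升容错率。"]
    else suggestions ++ ["建议：未检测到测试脚本，建议补充测试用例以提升项目健壮性。"]
  let suggestions := if py_files.any (fun f => PySem.Str.isIn "security" (PySem.Str.lower f)) then
      suggestions ++ ["建议：已集成安全相关模块，建议定期进行安全扫描和依赖升级。"]
    else suggestions ++ ["建议：未检测到安全相关模块，建议增加安全扫描器或依赖检查功能。"]
  let suggestions := if (decide (0 < doc_files.length)) then
      suggestions ++ ["建议：已检测到文档文件，可自动生成 API 文档和用户手册，支持多端协作。"]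
    else suggestions ++ ["建议：未检测到文档文件，建议补充 README.md 或开发文档以提升项目多项化发展。"]
  suggestions ++ ["建议：可集成更多 AI 模型或插件，提升智能化和自动化能力。"]

-- ===== PORT B =====
-- one loop iteration of Source B: update the six flags (has_py, has_js, has_config, has_test, has_sec, has_doc)
def pvAltStep (st : Bool × Bool × Bool × Bool × Bool × Bool) (f : String) :
    Bool × Bool × Bool × Bool × Bool × Bool :=
  match st with
  | (hp, hj, hc, ht, hs, hd) =>
    let (hp, ht, hs) :=
      if PySem.Str.endswith f ".py" then
        let g := PySem.Str.lower f
        (true, ht || PySem.Str.isIn "test" g, hs || PySem.Str.isIn "security" g)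
      else (hp, ht, hs)
    let hj := hj || PySem.Str.endswith f ".js"
    let hc := hc || (PySem.Str.endswith f ".yaml" || PySem.Str.endswith f ".yml" || PySem.Str.endswith f ".json")
    let hd := hd || PySem.Str.endswith f ".md"
    (hp, hj, hc, ht, hs, hd)

def generate_global_suggestions_alt (supported_files : List String) : List String :=
  match supported_files.foldl pvAltStep (false, false, false, false, false, false) with
  | (hp, hj, hc, ht, hs, hd) =>
    let suggestions : List String := []
    let suggestions := if (hp && hj) then
        suggestions ++ ["建议：项目包含多语言脚本，建议实现 Python 与 JS 的数据或接口联动。"] else suggestions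
    let suggestions := if !hc then
        suggestions ++ ["建议：未检测到配置文件，建议添加 .yaml/.json 配置以提升环境兼容性。"] else suggestions
    let suggestions := if ht then
        suggestions ++ ["建议：已检测到测试脚本，建议完善异常处理和单元测试以提升容错率。"]
      else suggestions ++ ["建议：未检测到测试脚本，建议补充测试用例以提升项目健壮性。"]
    let suggestions := if hs then
        suggestions ++ ["建议：已集成安全相关模块，建议定期进行安全扫描和依赖升级。"]
      else suggestions ++ ["建议：未检测到安全相关模块，建议增加安全扫描器或依赖检查功能。"]
    let suggestions := if hd then
        suggestions ++ ["建议：已检测到文档文件，可自动生成 API 文档和用户手册，支持多端协作。"]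
      else suggestions ++ ["建议：未检测到文档文件，建议补充 README.md 或开发文档以提升项目多项化发展。"]
    suggestions ++ ["建议：可集成更多 AI 模型或插件，提升智能化和自动化能力。"]

-- ===== PRECONDITION & SPEC =====
def Spec_generate_global_suggestions (supported_files : List String) (out : List String) : Prop := out = generate_global_suggestions_alt supported_files
instance (supported_files : List String) (out : List String) : Decidable (Spec_generate_global_suggestions supported_files out) := by unfold Spec_generate_global_suggestions; infer_instance

-- ===== CLAIM (what is proved, stated in full; the proofs are below) =====
def Claim_equal_generate_global_suggestions : Prop := ∀ (supported_files : List String), Dom_generate_global_suggestions supported_files → Spec_generate_global_suggestions supported_files (generate_global_suggestions supported_files)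

-- ===== LEMMAS AND PROOFS =====

-- the single pass computes exactly the six "any" facts A's comprehensions compute
theorem foldl_pvAltStep (xs : List String) (hp hj hc ht hs hd : Bool) :
    xs.foldl pvAltStep (hp, hj, hc, ht, hs, hd) =
      (hp || xs.any (fun f => PySem.Str.endswith f ".py"),
       hj || xs.any (fun f => PySem.Str.endswith f ".js"),
       hc || xs.any (fun f => PySem.Str.endswith f ".yaml" || PySem.Str.endswith f ".yml" || PySem.Str.endswith f ".json"),
       ht || xs.any (fun f => PySem.Str.endswith f ".py" && PySem.Str.isIn "test" (PySem.Str.lower f)),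
       hs || xs.any (fun f => PySem.Str.endswith f ".py" && PySem.Str.isIn "security" (PySem.Str.lower f)),
       hd || xs.any (fun f => PySem.Str.endswith f ".md")) := by
  induction xs generalizing hp hj hc ht hs hd with
  | nil => simp
  | cons x xs ih =>
    simp only [List.foldl_cons, List.any_cons, pvAltStep]
    cases h : PySem.Str.endswith x ".py" <;>
      simp [ih, Bool.or_assoc]

theorem length_pos_filter_iff {α : Type} (p : α → Bool) (xs : List α) :
    0 < (xs.filter p).length ↔ xs.any p = true := by
  rw [List.length_pos_iff, ne_eq, List.filter_eq_nil_iff, List.any_eq_true]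
  simp

theorem isEmpty_filter_eq {α : Type} (p : α → Bool) (xs : List α) :
    (xs.filter p).isEmpty = !(xs.any p) := by
  induction xs with
  | nil => simp
  | cons x xs ih =>
    cases h : p x <;> simp [h, ih]

theorem any_filter_eq {α : Type} (p q : α → Bool) (xs : List α) :
    (xs.filter p).any q = xs.any (fun a => p a && q a) := by
  induction xs with
  | nil => simp
  | cons x xs ih =>
    cases h : p x <;> simp [h, ih]

-- ===== VERDICT (by name: the statement is the Claim_ definition above) =====
theorem generate_global_suggestions_spec : Claim_equal_generate_global_suggestions := by
  intro xs _
  show generate_global_suggestions xs = generate_global_suggestions_alt xs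
  simp only [generate_global_suggestions, generate_global_suggestions_alt,
    foldl_pvAltStep, Bool.false_or, isEmpty_filter_eq, any_filter_eq,
    length_pos_filter_iff, Bool.and_eq_true, decide_eq_true_eq]
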